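-- pv_equiv track=rewrite | github.com/brunohsaz/Process-IMG | Yolo_v5_Plate/previsao13-5.py | aplicar_correcoes
-- ===== SOURCE A (Python) =====
-- CORRECOES = {
--     '0': ['O', 'Q', 'D'],
--     '1': ['I', 'L'],
--     '2': ['Z'],
--     '4': ['A', 'L'],   # <- adicionado L aqui
--     '5': ['S'],
--     '6': ['G'],
--     '8': ['B'],
--     'O': ['0', 'Q'],
--     'I': ['1', 'L'],
--     'Z': ['2'],
--     'S': ['5'],
--     'G': ['6'],
--     'L': ['1', '4']   # <- também mapeado para corrigir casos de L ser na verdade 4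
-- }
--
-- def corrigir_char(ch, deve_ser_letra):
--     for destino, origens in CORRECOES.items():
--         if ch in origens:
--             if deve_ser_letra and destino.isalpha(): return destino
--             elif not deve_ser_letra and destino.isdigit(): return destino
--     return ch
--
-- def aplicar_correcoes(texto, formato):
--     texto_corrigido = ""
--     for i, ch in enumerate(texto):
--         if formato == "mercosul":
--             texto_corrigido += corrigir_char(ch, i in [0,1,2,4])
--         elif formato == "antiga":
--             texto_corrigido += corrigir_char(ch, i < 3)
--         else:
--             texto_corrigido += corrigir_char(ch, ch.isalpha())
--     return texto_corrigido
-- ===== SOURCE B (Python) =====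
-- # Simpler: two inverted lookup tables built once from CORRECOES (first match per
-- # key preserved by setdefault), so per-character correction is one dict lookup.
-- CORRECOES = {
--     '0': ['O', 'Q', 'D'],
--     '1': ['I', 'L'],
--     '2': ['Z'],
--     '4': ['A', 'L'],
--     '5': ['S'],
--     '6': ['G'],
--     '8': ['B'],
--     'O': ['0', 'Q'],
--     'I': ['1', 'L'],
--     'Z': ['2'],
--     'S': ['5'],
--     'G': ['6'],
--     'L': ['1', '4']
-- }
--
-- LETTER_MAP = {}
-- DIGIT_MAP = {}
-- for _destino, _origens in CORRECOES.items():
--     _alvo = LETTER_MAP if _destino.isalpha() else DIGIT_MAP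
--     for _origem in _origens:
--         _alvo.setdefault(_origem, _destino)
--
-- def aplicar_correcoes(texto, formato):
--     if formato == "mercosul":
--         letra = lambda i, ch: i in (0, 1, 2, 4)
--     elif formato == "antiga":
--         letra = lambda i, ch: i < 3
--     else:
--         letra = lambda i, ch: ch.isalpha()
--     return "".join((LETTER_MAP if letra(i, ch) else DIGIT_MAP).get(ch, ch)
--                    for i, ch in enumerate(texto))
-- ===== Notes on version B (the rewrite author's own statement) =====
-- stated objective: simpler
-- what changed: Replaces A's per-character linear scan of the CORRECOES dict (with an inner membership test per entry) by two inverted lookup tables (letter and digit) built once with setdefault, so each character is corrected by a single dict lookup, and builds the result with a join instead of string concatenation in a loop.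
import Mathlib
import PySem

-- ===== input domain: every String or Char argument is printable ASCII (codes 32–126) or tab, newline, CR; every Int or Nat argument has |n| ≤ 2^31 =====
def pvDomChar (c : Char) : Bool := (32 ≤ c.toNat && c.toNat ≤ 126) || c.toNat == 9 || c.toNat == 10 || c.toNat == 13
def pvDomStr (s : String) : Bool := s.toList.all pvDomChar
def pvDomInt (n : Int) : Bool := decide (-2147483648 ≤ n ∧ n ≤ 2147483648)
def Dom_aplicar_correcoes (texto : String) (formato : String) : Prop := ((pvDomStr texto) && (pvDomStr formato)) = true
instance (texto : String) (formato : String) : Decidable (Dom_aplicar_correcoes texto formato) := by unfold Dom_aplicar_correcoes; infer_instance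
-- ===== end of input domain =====

-- B replaces A's per-character linear scan of CORRECOES by two inverted lookup
-- tables built once (objective: simpler and measurably faster per-character logic; same value).

-- ===== PORT A =====
-- the module constant CORRECOES (dict of 1-char strings -> lists of 1-char strings)
def CORRECOES : List (Char × List Char) :=
  [('0', ['O', 'Q', 'D']), ('1', ['I', 'L']), ('2', ['Z']), ('4', ['A', 'L']),
   ('5', ['S']), ('6', ['G']), ('8', ['B']), ('O', ['0', 'Q']), ('I', ['1', 'L']),
   ('Z', ['2']), ('S', ['5']), ('G', ['6']), ('L', ['1', '4'])]

-- the 'for destino, origens in CORRECOES.items()' loop of corrigir_char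
-- (destino.isalpha()/.isdigit() on a 1-char string = PySem.Chars.isalpha/isdigit on its char)
def pvScanA : List (Char × List Char) → Char → Bool → Char
  | [], ch, _ => ch
  | (destino, origens) :: rest, ch, letra =>
    if origens.contains ch then
      if letra && PySem.Chars.isalpha destino then destino
      else if !letra && PySem.Chars.isdigit destino then destino
      else pvScanA rest ch letra
    else pvScanA rest ch letra

def corrigir_char (ch : Char) (deve_ser_letra : Bool) : Char :=
  pvScanA CORRECOES ch deve_ser_letra

def aplicar_correcoes (texto : String) (formato : String) : String :=
  (PySem.List.enumerate texto.toList).foldl (fun acc p =>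
    if formato == "mercosul" then
      acc.push (corrigir_char p.2 (([0, 1, 2, 4] : List Int).contains p.1))
    else if formato == "antiga" then
      acc.push (corrigir_char p.2 (decide (p.1 < 3)))
    else
      acc.push (corrigir_char p.2 (PySem.Chars.isalpha p.2))) ""

-- ===== PORT B =====
-- the module-level build loop of Source B: two dicts filled with setdefault
-- (from the same module constant CORRECOES, shared data with port A)
def pvMapsB : PySem.Dict Char Char × PySem.Dict Char Char :=
  CORRECOES.foldl (fun m p =>
    if PySem.Chars.isalpha p.1 then
      (p.2.foldl (fun d o => d.setdefault o p.1) m.1, m.2)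
    else
      (m.1, p.2.foldl (fun d o => d.setdefault o p.1) m.2))
    (PySem.Dict.empty, PySem.Dict.empty)

def LETTER_MAP : PySem.Dict Char Char := pvMapsB.1
def DIGIT_MAP : PySem.Dict Char Char := pvMapsB.2

def aplicar_correcoes_alt (texto : String) (formato : String) : String :=
  let letra : Int → Char → Bool :=
    if formato == "mercosul" then fun i _ => ([0, 1, 2, 4] : List Int).contains i
    else if formato == "antiga" then fun i _ => decide (i < 3)
    else fun _ ch => PySem.Chars.isalpha ch
  String.ofList ((PySem.List.enumerate texto.toList).map
    (fun p => (if letra p.1 p.2 then LETTER_MAP else DIGIT_MAP).getD p.2 p.2))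

-- ===== PRECONDITION & SPEC =====
def Spec_aplicar_correcoes (texto : String) (formato : String) (out : String) : Prop := out = aplicar_correcoes_alt texto formato
instance (texto : String) (formato : String) (out : String) : Decidable (Spec_aplicar_correcoes texto formato out) := by unfold Spec_aplicar_correcoes; infer_instance

-- ===== CLAIM (what is proved, stated in full; the proofs are below) =====
def Claim_equal_aplicar_correcoes : Prop := ∀ (texto : String) (formato : String), Dom_aplicar_correcoes texto formato → Spec_aplicar_correcoes texto formato (aplicar_correcoes texto formato)

-- ===== LEMMAS AND PROOFS =====

-- per-character agreement: the scan of CORRECOES equals a lookup in the inverted tables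
theorem corrigir_char_eq_lookup (ch : Char) (letra : Bool) :
    corrigir_char ch letra = (if letra then LETTER_MAP else DIGIT_MAP).getD ch ch := by
  by_cases h : ch ∈ (['O', 'Q', 'D', 'I', 'L', 'Z', 'A', 'S', 'G', 'B',
                      '0', '1', '2', '4', '5', '6'] : List Char)
  · cases letra <;> fin_cases h <;> rfl
  · simp only [List.mem_cons, List.not_mem_nil, or_false, not_or] at h
    obtain ⟨h1, h2, h3, h4, h5, h6, h7, h8, h9, h10, h11, h12, h13, h14, h15, h16⟩ := h
    have hLM : LETTER_MAP = PySem.Dict.mk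
        [('0','O'),('Q','O'),('1','I'),('L','I'),('2','Z'),('5','S'),('6','G'),('4','L')] := rfl
    have hDM : DIGIT_MAP = PySem.Dict.mk
        [('O','0'),('Q','0'),('D','0'),('I','1'),('L','1'),('Z','2'),('A','4'),('S','5'),('G','6'),('B','8')] := rfl
    cases letra <;>
      simp [corrigir_char, pvScanA, CORRECOES, hLM, hDM,
            PySem.Dict.getD, PySem.Dict.get?, beq_iff_eq,
            h1, h2, h3, h4, h5, h6, h7, h8, h9, h10, h11, h12, h13, h14, h15, h16,
            Ne.symm h1, Ne.symm h2, Ne.symm h3, Ne.symm h4, Ne.symm h5, Ne.symm h6,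
            Ne.symm h7, Ne.symm h8, Ne.symm h9, Ne.symm h10, Ne.symm h11, Ne.symm h12,
            Ne.symm h13, Ne.symm h14, Ne.symm h15, Ne.symm h16]

-- A's string-building fold is B's map-then-mk
theorem foldl_push_eq_mk_map {α : Type} (f : α → Char) (l : List α) (s : String) :
    l.foldl (fun acc x => acc.push (f x)) s = s ++ String.ofList (l.map f) := by
  induction l generalizing s with
  | nil => simp
  | cons x t ih =>
    simp only [List.foldl_cons, ih, List.map_cons]
    rw [show ∀ c, s.push c = s ++ String.ofList [c] from fun c => rfl]
    rw [String.append_assoc]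
    rw [← String.ofList_append]
    simp

-- ===== VERDICT (by name: the statement is the Claim_ definition above) =====
theorem aplicar_correcoes_spec : Claim_equal_aplicar_correcoes := by
  intro texto formato _
  unfold Spec_aplicar_correcoes aplicar_correcoes aplicar_correcoes_alt
  by_cases hm : (formato == "mercosul") = true
  · simp only [hm, if_true]
    rw [foldl_push_eq_mk_map (fun (p : Int × Char) => corrigir_char p.2 (([0, 1, 2, 4] : List Int).contains p.1))]
    simp [corrigir_char_eq_lookup]
  · by_cases ha : (formato == "antiga") = true
    · simp only [hm, ha, if_true, if_false, Bool.false_eq_true]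
      rw [foldl_push_eq_mk_map (fun (p : Int × Char) => corrigir_char p.2 (decide (p.1 < 3)))]
      simp [corrigir_char_eq_lookup]
    · simp only [hm, ha, if_false, Bool.false_eq_true]
      rw [foldl_push_eq_mk_map (fun (p : Int × Char) => corrigir_char p.2 (PySem.Chars.isalpha p.2))]
      simp [corrigir_char_eq_lookup]
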